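-- pv_equiv track=rewrite | github.com/Mamlesh18/LeetCode | Codin-ninjas-array/binary-array-sorting.py | binary_sorted
-- ===== SOURCE A (Python) =====
-- def binary_sorted(arr):
--     n = len(arr)
--     stack = []
--     for i in range(0,n):
--         if arr[i] == 0:
--             stack.append(arr[i])
--     for j in range(0,n):
--         if arr[j] == 1:
--             stack.append(arr[j])
--
--     return " ".join(map(str,stack))
-- ===== SOURCE B (Python) =====
-- def binary_sorted(arr):
--     zeros = arr.count(0)
--     ones = arr.count(1)
--     return " ".join(["0"] * zeros + ["1"] * ones)
-- ===== Notes on version B (the rewrite author's own statement) =====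
-- stated objective: simpler
-- what changed: Replaces the two element-collecting index loops over the array with counting: count the 0s and 1s once and reconstruct the output directly from the two counts.
import Mathlib
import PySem

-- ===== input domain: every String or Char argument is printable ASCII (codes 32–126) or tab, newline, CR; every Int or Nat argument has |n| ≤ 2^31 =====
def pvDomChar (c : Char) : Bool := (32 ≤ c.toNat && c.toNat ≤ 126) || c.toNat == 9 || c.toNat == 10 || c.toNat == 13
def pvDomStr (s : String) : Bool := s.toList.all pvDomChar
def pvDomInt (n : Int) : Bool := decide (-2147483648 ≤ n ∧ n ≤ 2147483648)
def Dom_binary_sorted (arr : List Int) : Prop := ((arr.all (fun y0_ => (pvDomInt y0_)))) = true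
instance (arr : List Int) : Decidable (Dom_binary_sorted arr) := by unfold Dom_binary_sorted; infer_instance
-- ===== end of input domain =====

-- B counts the 0s and 1s and reconstructs the string from the counts instead of
-- collecting elements with two index loops; objective: simpler.

-- ===== PORT A =====
def binary_sorted (arr : List Int) : String :=
  let n : Int := arr.length
  let stack : List Int :=
    (PySem.List.pyRange 0 n 1).foldl
      (fun acc i => if PySem.List.pyGetD arr i 0 == 0 then acc ++ [PySem.List.pyGetD arr i 0] else acc) []
  let stack2 : List Int :=
    (PySem.List.pyRange 0 n 1).foldl
      (fun acc j => if PySem.List.pyGetD arr j 0 == 1 then acc ++ [PySem.List.pyGetD arr j 0] else acc) stack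
  PySem.Str.join " " (stack2.map PySem.Int.toStr)

-- ===== PORT B =====
def binary_sorted_alt (arr : List Int) : String :=
  let zeros : Nat := arr.count 0
  let ones : Nat := arr.count 1
  PySem.Str.join " " (List.replicate zeros "0" ++ List.replicate ones "1")

-- ===== PRECONDITION & SPEC =====
def Spec_binary_sorted (arr : List Int) (out : String) : Prop := out = binary_sorted_alt arr
instance (arr : List Int) (out : String) : Decidable (Spec_binary_sorted arr out) := by unfold Spec_binary_sorted; infer_instance

-- ===== CLAIM (what is proved, stated in full; the proofs are below) =====
def Claim_equal_binary_sorted : Prop := ∀ (arr : List Int), Dom_binary_sorted arr → Spec_binary_sorted arr (binary_sorted arr)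

-- ===== LEMMAS AND PROOFS =====

-- the element-collecting index loop of A collects exactly the filtered elements
theorem pv_loop_filter (arr : List Int) (c : Int) (acc : List Int) :
    (PySem.List.pyRange 0 (arr.length : Int) 1).foldl
      (fun a i => if PySem.List.pyGetD arr i 0 == c then a ++ [PySem.List.pyGetD arr i 0] else a) acc
    = acc ++ arr.filter (· == c) := by
  rw [PySem.List.foldl_pyRange_zero_pyGetD' arr 0
        (fun a x => if x == c then a ++ [x] else a) acc]
  exact PySem.List.foldl_append_if_eq_filter _ _ _

-- ===== VERDICT (by name: the statement is the Claim_ definition above) =====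
theorem binary_sorted_spec : Claim_equal_binary_sorted := by
  intro arr _
  show binary_sorted arr = binary_sorted_alt arr
  unfold binary_sorted binary_sorted_alt
  simp only [pv_loop_filter, List.nil_append, List.filter_beq, List.map_append,
    List.map_replicate]
  rfl
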